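-- pv_equiv track=rewrite | github.com/wyk18703232953/myResearch | codeComplex/demo/onlyCode/results/cubic/results_python_cubic_0120/generated_python_cubic_0120.py | solve
-- ===== SOURCE A (Python) =====
-- def check(s, t1, t2):
--     s1 = len(t1)
--     s2 = len(t2)
--     n = len(s)
--     dp = [[-1] * (s1 + 1) for _ in range(n + 1)]
--     dp[0][0] = 0
--     for i in range(n):
--         for j in range(s1 + 1):
--             if dp[i][j] >= 0:
--                 if j < s1 and t1[j] == s[i]:
--                     dp[i + 1][j + 1] = max(dp[i + 1][j + 1], dp[i][j])
--                 if dp[i][j] < s2 and t2[dp[i][j]] == s[i]: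
--                     dp[i + 1][j] = max(dp[i + 1][j], dp[i][j] + 1)
--             dp[i + 1][j] = max(dp[i + 1][j], dp[i][j])
--     if dp[n][s1] == s2:
--         return True
--     else:
--         return False
--
-- def solve(s, t):
--     le = len(t)
--     for i in range(le):
--         t1 = t[:i]
--         t2 = t[i:]
--         if check(s, t1, t2) == True:
--             return "YES"
--     return "NO"
-- ===== SOURCE B (Python) =====
-- def _build_nxt(s):
--     # nxt[p][c] = least q >= p with ord(s[q]) == c, else len(s); for p in 0..len(s)
--     n = len(s)
--     rows = [[n] * 128]
--     for p in range(n - 1, -1, -1):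
--         row = rows[-1][:]
--         row[ord(s[p])] = p
--         rows.append(row)
--     return rows[::-1]
--
-- def _step(nxt, n, p, c):
--     # least prefix length of s after consuming one occurrence of c at position >= p; n+1 = impossible
--     if p > n:
--         return n + 1
--     return nxt[p][ord(c)] + 1
--
-- def _check_min(nxt, n, u, v):
--     # e[j][k] = least prefix length of s into which u[:j] and v[:k] embed as
--     # disjoint (interleavable) subsequences; rolling rows over j.
--     lu, lv = len(u), len(v)
--     prev = [0]
--     for k in range(1, lv + 1):
--         prev.append(_step(nxt, n, prev[k - 1], v[k - 1]))
--     for j in range(1, lu + 1):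
--         cur = [_step(nxt, n, prev[0], u[j - 1])]
--         for k in range(1, lv + 1):
--             cur.append(min(_step(nxt, n, cur[k - 1], v[k - 1]),
--                            _step(nxt, n, prev[k], u[j - 1])))
--         prev = cur
--     return prev[lv] <= n
--
-- def solve(s, t):
--     n = len(s)
--     le = len(t)
--     nxt = _build_nxt(s)
--     for i in range(le):
--         if _check_min(nxt, n, t[:i], t[i:]):
--             return "YES"
--     return "NO"
-- ===== Notes on version B (the rewrite author's own statement) =====
-- stated objective: faster
-- what changed: A runs, for every split of t, a max-match DP over all positions of s (dp[i][j] = most suffix chars matched); B precomputes a next-occurrence table of s once and, per split, fills a min-index DP over the (prefix-matched, suffix-matched) grid (e[j][k] = least prefix of s embedding both), so per-split work no longer scans s.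
import Mathlib
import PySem

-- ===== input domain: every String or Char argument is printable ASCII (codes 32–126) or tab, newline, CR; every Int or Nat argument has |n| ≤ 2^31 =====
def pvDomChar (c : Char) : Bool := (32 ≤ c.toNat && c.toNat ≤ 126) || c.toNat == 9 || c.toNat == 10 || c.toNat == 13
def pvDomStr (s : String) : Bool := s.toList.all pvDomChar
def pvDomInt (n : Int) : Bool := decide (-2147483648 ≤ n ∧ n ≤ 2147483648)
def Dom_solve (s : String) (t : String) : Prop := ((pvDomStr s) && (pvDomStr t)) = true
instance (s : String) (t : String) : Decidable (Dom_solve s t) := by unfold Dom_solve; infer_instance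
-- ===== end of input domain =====

-- B replaces A's per-split O(len(s)·i) max-match DP over s-positions by a min-index DP over
-- the (prefix-matched, suffix-matched) grid driven by a precomputed next-occurrence table,
-- making the per-split work independent of len(s).

-- ===== PORT A =====
-- dp[i][j] read; indices are in range at every use (comment: pyGetD with default is exact there)
def get2 (dp : List (List Int)) (i j : Int) : Int :=
  PySem.List.pyGetD (PySem.List.pyGetD dp i []) j (-1)

-- dp[i][j] = max(dp[i][j], x)  (indices in range at every use)
def upd2max (dp : List (List Int)) (i j : Int) (x : Int) : List (List Int) :=
  dp.set i.toNat ((PySem.List.pyGetD dp i []).set j.toNat (max (get2 dp i j) x))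

def checkA (cs u v : List Char) : Bool :=
  let s1 : Int := u.length
  let s2 : Int := v.length
  let n : Int := cs.length
  -- dp = [[-1] * (s1 + 1) for _ in range(n + 1)]
  let dp : List (List Int) :=
    (PySem.List.pyRange 0 (n+1) 1).map (fun _ => PySem.List.pyRepeat [(-1 : Int)] (s1+1))
  -- dp[0][0] = 0
  let dp := dp.set 0 ((PySem.List.pyGetD dp 0 []).set 0 0)
  let dp := (PySem.List.pyRange 0 n 1).foldl (fun dp i =>
    (PySem.List.pyRange 0 (s1+1) 1).foldl (fun dp j =>
      let dp :=
        if 0 ≤ get2 dp i j then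
          let dp :=
            if j < s1 ∧ PySem.List.pyGetD u j ' ' = PySem.List.pyGetD cs i ' ' then
              upd2max dp (i+1) (j+1) (get2 dp i j)
            else dp
          let dp :=
            if get2 dp i j < s2 ∧ PySem.List.pyGetD v (get2 dp i j) ' ' = PySem.List.pyGetD cs i ' ' then
              upd2max dp (i+1) j (get2 dp i j + 1)
            else dp
          dp
        else dp
      upd2max dp (i+1) j (get2 dp i j)) dp) dp
  decide (get2 dp n s1 = s2)

def solve (s : String) (t : String) : String :=
  let le : Int := (t.toList.length : Int)
  -- for i in range(le): if check(s, t[:i], t[i:]): return "YES" — early-return loop as any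
  if (PySem.List.pyRange 0 le 1).any (fun i =>
      checkA s.toList (PySem.List.slice t.toList none (some i)) (PySem.List.slice t.toList (some i) none))
  then "YES" else "NO"

-- ===== PORT B =====
-- _step(nxt, n, p, c)
def stepB (nxt : List (List Int)) (n p : Int) (c : Char) : Int :=
  if p > n then n + 1
  else PySem.List.pyGetD (PySem.List.pyGetD nxt p []) (c.toNat : Int) n + 1

-- _build_nxt(s): rows built backwards (rows[-1][:] copy is the list itself), then reversed
def buildNxt (cs : List Char) : List (List Int) :=
  let n : Int := cs.length
  let rows := (PySem.List.pyRange (n-1) (-1) (-1)).foldl (fun rows p =>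
      rows ++ [(PySem.List.pyGetD rows (-1) []).set (PySem.List.pyGetD cs p ' ').toNat p])
    [PySem.List.pyRepeat [n] 128]
  rows.reverse

-- _check_min(nxt, n, u, v)
def checkB (nxt : List (List Int)) (n : Int) (u v : List Char) : Bool :=
  let lu : Int := u.length
  let lv : Int := v.length
  let prev : List Int := (PySem.List.pyRange 1 (lv+1) 1).foldl (fun prev k =>
      prev ++ [stepB nxt n (PySem.List.pyGetD prev (k-1) 0) (PySem.List.pyGetD v (k-1) ' ')]) [(0 : Int)]
  let prev := (PySem.List.pyRange 1 (lu+1) 1).foldl (fun prev j =>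
      let cur : List Int := [stepB nxt n (PySem.List.pyGetD prev 0 0) (PySem.List.pyGetD u (j-1) ' ')]
      let cur := (PySem.List.pyRange 1 (lv+1) 1).foldl (fun cur k =>
          cur ++ [min (stepB nxt n (PySem.List.pyGetD cur (k-1) 0) (PySem.List.pyGetD v (k-1) ' '))
                      (stepB nxt n (PySem.List.pyGetD prev k 0) (PySem.List.pyGetD u (j-1) ' '))]) cur
      cur) prev
  decide (PySem.List.pyGetD prev lv 0 ≤ n)

def solve_alt (s : String) (t : String) : String :=
  let cs := s.toList
  let n : Int := cs.length
  let le : Int := (t.toList.length : Int)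
  let nxt := buildNxt cs
  if (PySem.List.pyRange 0 le 1).any (fun i =>
      checkB nxt n (PySem.List.slice t.toList none (some i)) (PySem.List.slice t.toList (some i) none))
  then "YES" else "NO"

-- ===== PRECONDITION & SPEC =====
def Spec_solve (s : String) (t : String) (out : String) : Prop := out = solve_alt s t
instance (s : String) (t : String) (out : String) : Decidable (Spec_solve s t out) := by unfold Spec_solve; infer_instance

-- ===== CLAIM (what is proved, stated in full; the proofs are below) =====
def Claim_equal_solve : Prop := ∀ (s : String) (t : String), Dom_solve s t → Spec_solve s t (solve s t)

-- ===== LEMMAS AND PROOFS =====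

-- Reach cs u v i j k: u[:j] and v[:k] embed into cs[:i] as disjoint (interleavable) subsequences.
inductive Reach (cs u v : List Char) : Nat → Nat → Nat → Prop
  | zero : Reach cs u v 0 0 0
  | skip : ∀ {i j k}, Reach cs u v i j k → i < cs.length → Reach cs u v (i+1) j k
  | left : ∀ {i j k c}, Reach cs u v i j k → cs[i]? = some c → u[j]? = some c →
      Reach cs u v (i+1) (j+1) k
  | right : ∀ {i j k c}, Reach cs u v i j k → cs[i]? = some c → v[k]? = some c →
      Reach cs u v (i+1) j (k+1)

theorem reach_mono {cs u v : List Char} {i i' j k : Nat} (h : Reach cs u v i j k)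
    (h1 : i ≤ i') (h2 : i' ≤ cs.length) : Reach cs u v i' j k := by
  induction i' with
  | zero => exact Nat.le_zero.mp h1 ▸ h
  | succ m ih =>
    rcases Nat.lt_or_ge i (m+1) with hlt | hge
    · exact Reach.skip (ih (by omega) (by omega)) (by omega)
    · exact (Nat.le_antisymm h1 hge) ▸ h

theorem reach_zero_zero {cs u v : List Char} {i : Nat} (hi : i ≤ cs.length) :
    Reach cs u v i 0 0 :=
  reach_mono Reach.zero (Nat.zero_le _) hi

theorem reach_zero_inv {cs u v : List Char} {j k : Nat} (h : Reach cs u v 0 j k) :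
    j = 0 ∧ k = 0 := by
  cases h; exact ⟨rfl, rfl⟩

-- domain: every character code is < 128
theorem dom_codes {s : String} (h : pvDomStr s = true) : ∀ c ∈ s.toList, c.toNat < 128 := by
  intro c hc
  have := (List.all_eq_true.mp h) c hc
  simp [pvDomChar] at this
  omega

-- ===== B-side: the next-occurrence table =====

def nxtRow (cs : List Char) (p : Nat) : List Int :=
  if h : p < cs.length then (nxtRow cs (p+1)).set (cs.getD p ' ').toNat (p : Int)
  else List.replicate 128 (cs.length : Int)
termination_by cs.length - p

theorem nxtRow_length (cs : List Char) (p : Nat) : (nxtRow cs p).length = 128 := by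
  rw [nxtRow]
  split
  · rw [List.length_set]; exact nxtRow_length cs (p+1)
  · simp
termination_by cs.length - p
decreasing_by omega

theorem char_toNat_inj {c d : Char} (h : c.toNat = d.toNat) : c = d := by
  have := congrArg Char.ofNat h
  rwa [Char.ofNat_toNat, Char.ofNat_toNat] at this

theorem pyGetD_last_map_range (q : Nat) (f : Nat → List Int) :
    PySem.List.pyGetD ((List.range (q+1)).map f) (-1) [] = f q := by
  have h1 : PySem.List.pyIdx? (q+1) (-1) = some q := by
    simp [PySem.List.pyIdx?]
  simp [PySem.List.pyGetD, PySem.List.pyGet?, h1, List.getElem?_range]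

theorem buildNxt_get (cs : List Char) (p : Nat) (hp : p ≤ cs.length) :
    PySem.List.pyGetD (buildNxt cs) (p : Int) [] = nxtRow cs p := by
  have hrows : ∀ m : Nat, m ≤ cs.length →
      (List.range m).foldl (fun rows (k : Nat) =>
        rows ++ [(PySem.List.pyGetD rows (-1) []).set
          (PySem.List.pyGetD cs (((cs.length : Int)-1) - (k : Int)) ' ').toNat
          (((cs.length : Int)-1) - (k : Int))])
        [PySem.List.pyRepeat [((cs.length : Nat) : Int)] 128]
      = (List.range (m+1)).map (fun q => nxtRow cs (cs.length - q)) := by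
    intro m
    induction m with
    | zero =>
      intro _
      rw [PySem.List.pyRepeat_singleton]
      rw [List.range_one]
      simp only [List.foldl_nil, List.map_cons, List.map_nil]
      rw [nxtRow, dif_neg (by omega)]
      norm_num
      rfl
    | succ m ih =>
      intro hm
      rw [List.range_succ, List.foldl_append, ih (by omega)]
      simp only [List.foldl_cons, List.foldl_nil]
      rw [pyGetD_last_map_range m (fun q => nxtRow cs (cs.length - q))]
      have hidx : ((cs.length : Int)-1) - (m : Int) = ((cs.length - 1 - m : Nat) : Int) := by
        push_cast; omega
      rw [hidx, PySem.List.pyGetD_natCast]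
      rw [List.range_succ (n := m+1), List.map_append, List.map_cons, List.map_nil]
      have hnr : nxtRow cs (cs.length - (m+1)) =
          (nxtRow cs (cs.length - m)).set (cs.getD (cs.length - 1 - m) ' ').toNat
            ((cs.length - 1 - m : Nat) : Int) := by
        rw [nxtRow, dif_pos (by omega)]
        have e1 : cs.length - (m+1) + 1 = cs.length - m := by omega
        have e2 : cs.length - (m+1) = cs.length - 1 - m := by omega
        rw [e1, e2]
      rw [hnr]
  simp only [buildNxt]
  rw [PySem.List.pyRange_neg_one]
  have h2 : (((cs.length : Int) - 1) - (-1)).toNat = cs.length := by omega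
  rw [h2, List.foldl_map, hrows cs.length (le_refl _)]
  rw [PySem.List.pyGetD_natCast, List.getD_eq_getElem?_getD,
      List.getElem?_reverse (by simp; omega)]
  have h3 : ((List.range (cs.length+1)).map (fun q => nxtRow cs (cs.length - q))).length - 1 - p
      = cs.length - p := by simp
  rw [h3]
  have h4 : cs.length - p < cs.length + 1 := by omega
  simp only [List.getElem?_map, List.getElem?_range, h4, if_pos]
  have h5 : cs.length - (cs.length - p) = p := by omega
  simp [h4, h5]

theorem nxtRow_spec (cs : List Char) (p : Nat) (c : Char) (hp : p ≤ cs.length)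
    (hcs : ∀ ch ∈ cs, ch.toNat < 128) :
    0 ≤ PySem.List.pyGetD (nxtRow cs p) (c.toNat : Int) (cs.length : Int) ∧
    PySem.List.pyGetD (nxtRow cs p) (c.toNat : Int) (cs.length : Int) ≤ (cs.length : Int) ∧
    ∀ i : Nat, i ≤ cs.length →
      (PySem.List.pyGetD (nxtRow cs p) (c.toNat : Int) (cs.length : Int) + 1 ≤ (i : Int) ↔
        ∃ m : Nat, p ≤ m ∧ m < i ∧ cs[m]? = some c) := by
  rw [PySem.List.pyGetD_natCast]
  by_cases hplt : p < cs.length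
  · have hmem : cs.getD p ' ' ∈ cs := by
      rw [List.getD_eq_getElem _ _ hplt]; exact List.getElem_mem _
    have ha : (cs.getD p ' ').toNat < 128 := hcs _ hmem
    have hlen : (nxtRow cs (p+1)).length = 128 := nxtRow_length cs (p+1)
    rw [nxtRow, dif_pos hplt]
    by_cases hceq : c.toNat = (cs.getD p ' ').toNat
    · have hc : c = cs.getD p ' ' := char_toNat_inj hceq
      have hv : ((nxtRow cs (p+1)).set (cs.getD p ' ').toNat (p : Int)).getD c.toNat (cs.length : Int)
          = (p : Int) := by
        rw [List.getD_eq_getElem?_getD, hceq, List.getElem?_set_self (by omega), Option.getD_some]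
      rw [hv]
      have hcp : cs[p]? = some c := by
        rw [List.getElem?_eq_getElem hplt, hc, List.getD_eq_getElem _ _ hplt]
      refine ⟨by positivity, by exact_mod_cast Nat.le_of_lt hplt, fun i hi => ⟨?_, ?_⟩⟩
      · intro h
        exact ⟨p, le_refl _, by push_cast at h; omega, hcp⟩
      · rintro ⟨m, hm1, hm2, hm3⟩
        push_cast; omega
    · have hv : ((nxtRow cs (p+1)).set (cs.getD p ' ').toNat (p : Int)).getD c.toNat (cs.length : Int)
          = (nxtRow cs (p+1)).getD c.toNat (cs.length : Int) := by
        rw [List.getD_eq_getElem?_getD, List.getElem?_set_ne (fun h => hceq h.symm),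
            ← List.getD_eq_getElem?_getD]
      rw [hv]
      have ih := nxtRow_spec cs (p+1) c (by omega) hcs
      rw [PySem.List.pyGetD_natCast] at ih
      obtain ⟨ih1, ih2, ih3⟩ := ih
      refine ⟨ih1, ih2, fun i hi => ?_⟩
      rw [ih3 i hi]
      constructor
      · rintro ⟨m, hm1, hm2, hm3⟩; exact ⟨m, by omega, hm2, hm3⟩
      · rintro ⟨m, hm1, hm2, hm3⟩
        rcases Nat.eq_or_lt_of_le hm1 with he | hlt2
        · exfalso
          subst he
          obtain ⟨hmlt, hme⟩ := List.getElem?_eq_some_iff.mp hm3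
          apply hceq
          rw [List.getD_eq_getElem _ _ hplt, ← hme]
        · exact ⟨m, hlt2, hm2, hm3⟩
  · have hpe : p = cs.length := by omega
    subst hpe
    rw [nxtRow, dif_neg (by omega)]
    have hv : (List.replicate 128 ((cs.length : Nat) : Int)).getD c.toNat (cs.length : Int)
        = (cs.length : Int) := by
      by_cases h : c.toNat < 128
      · exact List.getD_replicate _ h
      · exact List.getD_eq_default _ _ (by simpa using Nat.le_of_not_lt h)
    rw [hv]
    refine ⟨by positivity, le_refl _, fun i hi => ⟨fun h => absurd h (by push_cast; omega), ?_⟩⟩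
    rintro ⟨m, hm1, hm2, hm3⟩
    omega
termination_by cs.length - p
decreasing_by omega

theorem stepB_spec (cs : List Char) (p : Int) (c : Char)
    (hcs : ∀ ch ∈ cs, ch.toNat < 128) (hp0 : 0 ≤ p) (hpn : p ≤ (cs.length : Int) + 1) :
    0 ≤ stepB (buildNxt cs) (cs.length : Int) p c ∧
    stepB (buildNxt cs) (cs.length : Int) p c ≤ (cs.length : Int) + 1 ∧
    ∀ i : Nat, i ≤ cs.length →
      (stepB (buildNxt cs) (cs.length : Int) p c ≤ (i : Int) ↔
        ∃ m : Nat, p ≤ (m : Int) ∧ m < i ∧ cs[m]? = some c) := by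
  unfold stepB
  by_cases hgt : p > (cs.length : Int)
  · rw [if_pos hgt]
    refine ⟨by positivity, le_refl _, fun i hi => ⟨fun h => absurd h (by push_cast; omega), ?_⟩⟩
    rintro ⟨m, hm1, hm2, hm3⟩
    have : (m : Int) ≤ (cs.length : Int) := by push_cast; omega
    omega
  · rw [if_neg hgt]
    have hpn' : p.toNat ≤ cs.length := by omega
    have hpc : p = ((p.toNat : Nat) : Int) := by omega
    rw [hpc, buildNxt_get cs p.toNat hpn']
    obtain ⟨h1, h2, h3⟩ := nxtRow_spec cs p.toNat c hpn' hcs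
    refine ⟨by omega, by omega, fun i hi => ?_⟩
    rw [h3 i hi]
    constructor
    · rintro ⟨m, hm1, hm2, hm3⟩; exact ⟨m, by push_cast; omega, hm2, hm3⟩
    · rintro ⟨m, hm1, hm2, hm3⟩; exact ⟨m, by omega, hm2, hm3⟩

-- BspecP cs u v j k x: x is the min-index value of cell (j,k)
def BspecP (cs u v : List Char) (j k : Nat) (x : Int) : Prop :=
  0 ≤ x ∧ x ≤ (cs.length : Int) + 1 ∧
  ∀ i : Nat, i ≤ cs.length → (Reach cs u v i j k ↔ x ≤ (i : Int))

theorem Bspec_zero (cs u v : List Char) : BspecP cs u v 0 0 0 := by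
  refine ⟨le_refl _, by positivity, fun i hi => ⟨fun _ => by positivity, fun _ => reach_zero_zero hi⟩⟩

theorem getD_snoc_lt {l : List Int} {y d : Int} {k : Nat} (h : k < l.length) :
    (l ++ [y]).getD k d = l.getD k d := by
  rw [List.getD_eq_getElem?_getD, List.getElem?_append_left h, ← List.getD_eq_getElem?_getD]

theorem getD_snoc_eq {l : List Int} {y d : Int} :
    (l ++ [y]).getD l.length d = y := by
  rw [List.getD_eq_getElem?_getD, List.getElem?_append_right (le_refl _)]
  simp

theorem getD_self_of_lt {l : List Char} {k : Nat} (h : k < l.length) :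
    l[k]? = some (l.getD k ' ') := by
  rw [List.getElem?_eq_getElem h, List.getD_eq_getElem _ _ h]

theorem Bspec_right (cs u v : List Char) (k : Nat) (x : Int)
    (hcs : ∀ ch ∈ cs, ch.toNat < 128)
    (h : BspecP cs u v 0 k x) (hk : k < v.length) :
    BspecP cs u v 0 (k+1) (stepB (buildNxt cs) (cs.length : Int) x (v.getD k ' ')) := by
  obtain ⟨h0, h1, h2⟩ := h
  obtain ⟨s0, s1, s2⟩ := stepB_spec cs x (v.getD k ' ') hcs h0 h1
  have fwd : ∀ i : Nat, i ≤ cs.length → Reach cs u v i 0 (k+1) →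
      stepB (buildNxt cs) (cs.length : Int) x (v.getD k ' ') ≤ (i : Int) := by
    intro i
    induction i with
    | zero => intro _ hR; cases hR
    | succ m ih =>
      intro hm hR
      cases hR with
      | skip hR' hlt => exact le_trans (ih (by omega) hR') (by push_cast; omega)
      | right hR' hc hv' =>
        have hx : x ≤ (m : Int) := (h2 m (by omega)).mp hR'
        refine (s2 (m+1) (by omega)).mpr ⟨m, hx, by omega, ?_⟩
        obtain ⟨hk', heq⟩ := List.getElem?_eq_some_iff.mp hv'
        rw [hc]
        congr 1
        rw [List.getD_eq_getElem _ _ hk']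
        exact heq.symm
  refine ⟨s0, s1, fun i hi => ⟨fwd i hi, ?_⟩⟩
  intro hstep
  obtain ⟨m, hm1, hm2, hm3⟩ := (s2 i hi).mp hstep
  have hRm : Reach cs u v m 0 k := (h2 m (by omega)).mpr hm1
  exact reach_mono (Reach.right hRm hm3 (getD_self_of_lt hk)) (by omega) hi

theorem Bspec_left (cs u v : List Char) (j : Nat) (x : Int)
    (hcs : ∀ ch ∈ cs, ch.toNat < 128)
    (h : BspecP cs u v j 0 x) (hj : j < u.length) :
    BspecP cs u v (j+1) 0 (stepB (buildNxt cs) (cs.length : Int) x (u.getD j ' ')) := by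
  obtain ⟨h0, h1, h2⟩ := h
  obtain ⟨s0, s1, s2⟩ := stepB_spec cs x (u.getD j ' ') hcs h0 h1
  have fwd : ∀ i : Nat, i ≤ cs.length → Reach cs u v i (j+1) 0 →
      stepB (buildNxt cs) (cs.length : Int) x (u.getD j ' ') ≤ (i : Int) := by
    intro i
    induction i with
    | zero => intro _ hR; cases hR
    | succ m ih =>
      intro hm hR
      cases hR with
      | skip hR' hlt => exact le_trans (ih (by omega) hR') (by push_cast; omega)
      | left hR' hc hu' =>
        have hx : x ≤ (m : Int) := (h2 m (by omega)).mp hR'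
        refine (s2 (m+1) (by omega)).mpr ⟨m, hx, by omega, ?_⟩
        obtain ⟨hj', heq⟩ := List.getElem?_eq_some_iff.mp hu'
        rw [hc]
        congr 1
        rw [List.getD_eq_getElem _ _ hj']
        exact heq.symm
  refine ⟨s0, s1, fun i hi => ⟨fwd i hi, ?_⟩⟩
  intro hstep
  obtain ⟨m, hm1, hm2, hm3⟩ := (s2 i hi).mp hstep
  have hRm : Reach cs u v m j 0 := (h2 m (by omega)).mpr hm1
  exact reach_mono (Reach.left hRm hm3 (getD_self_of_lt hj)) (by omega) hi

theorem Bspec_inner (cs u v : List Char) (j k : Nat) (xA xB : Int)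
    (hcs : ∀ ch ∈ cs, ch.toNat < 128)
    (hA : BspecP cs u v (j+1) k xA) (hB : BspecP cs u v j (k+1) xB)
    (hj : j < u.length) (hk : k < v.length) :
    BspecP cs u v (j+1) (k+1)
      (min (stepB (buildNxt cs) (cs.length : Int) xA (v.getD k ' '))
           (stepB (buildNxt cs) (cs.length : Int) xB (u.getD j ' '))) := by
  obtain ⟨a0, a1, a2⟩ := hA
  obtain ⟨b0, b1, b2⟩ := hB
  obtain ⟨sa0, sa1, sa2⟩ := stepB_spec cs xA (v.getD k ' ') hcs a0 a1
  obtain ⟨sb0, sb1, sb2⟩ := stepB_spec cs xB (u.getD j ' ') hcs b0 b1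
  have fwd : ∀ i : Nat, i ≤ cs.length → Reach cs u v i (j+1) (k+1) →
      min (stepB (buildNxt cs) (cs.length : Int) xA (v.getD k ' '))
        (stepB (buildNxt cs) (cs.length : Int) xB (u.getD j ' ')) ≤ (i : Int) := by
    intro i
    induction i with
    | zero => intro _ hR; cases hR
    | succ m ih =>
      intro hm hR
      cases hR with
      | skip hR' hlt => exact le_trans (ih (by omega) hR') (by push_cast; omega)
      | left hR' hc hu' =>
        have hx : xB ≤ (m : Int) := (b2 m (by omega)).mp hR'
        refine le_trans (min_le_right _ _) ((sb2 (m+1) (by omega)).mpr ⟨m, hx, by omega, ?_⟩)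
        obtain ⟨hj', heq⟩ := List.getElem?_eq_some_iff.mp hu'
        rw [hc]
        congr 1
        rw [List.getD_eq_getElem _ _ hj']
        exact heq.symm
      | right hR' hc hv' =>
        have hx : xA ≤ (m : Int) := (a2 m (by omega)).mp hR'
        refine le_trans (min_le_left _ _) ((sa2 (m+1) (by omega)).mpr ⟨m, hx, by omega, ?_⟩)
        obtain ⟨hk', heq⟩ := List.getElem?_eq_some_iff.mp hv'
        rw [hc]
        congr 1
        rw [List.getD_eq_getElem _ _ hk']
        exact heq.symm
  refine ⟨le_min sa0 sb0, le_trans (min_le_left _ _) sa1, fun i hi => ⟨fwd i hi, ?_⟩⟩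
  intro hstep
  rcases min_le_iff.mp hstep with hs | hs
  · obtain ⟨m, hm1, hm2, hm3⟩ := (sa2 i hi).mp hs
    have hRm : Reach cs u v m (j+1) k := (a2 m (by omega)).mpr hm1
    exact reach_mono (Reach.right hRm hm3 (getD_self_of_lt hk)) (by omega) hi
  · obtain ⟨m, hm1, hm2, hm3⟩ := (sb2 i hi).mp hs
    have hRm : Reach cs u v m j (k+1) := (b2 m (by omega)).mpr hm1
    exact reach_mono (Reach.left hRm hm3 (getD_self_of_lt hj)) (by omega) hi

-- the rows built by checkB
def rowBOK (cs u v : List Char) (j : Nat) (r : List Int) : Prop :=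
  r.length = v.length + 1 ∧ ∀ k, k ≤ v.length → BspecP cs u v j k (r.getD k 0)

def rowB0 (cs v : List Char) (K : Nat) : List Int :=
  (PySem.List.pyRange 1 ((K : Int)+1) 1).foldl (fun prev k =>
      prev ++ [stepB (buildNxt cs) ((cs.length : Nat) : Int) (PySem.List.pyGetD prev (k-1) 0)
        (PySem.List.pyGetD v (k-1) ' ')]) [(0 : Int)]

theorem rowB0_succ (cs v : List Char) (K : Nat) :
    rowB0 cs v (K+1) = rowB0 cs v K ++
      [stepB (buildNxt cs) ((cs.length : Nat) : Int) (PySem.List.pyGetD (rowB0 cs v K) ((K : Int)+1-1) 0)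
        (PySem.List.pyGetD v ((K : Int)+1-1) ' ')] := by
  unfold rowB0
  have hc : (((K+1 : Nat) : Int)+1) = ((K : Int)+1)+1 := by push_cast; ring
  rw [hc, PySem.List.pyRange_one_succ_right (by omega), List.foldl_append]
  simp only [List.foldl_cons, List.foldl_nil]

theorem rowB0_len (cs v : List Char) (K : Nat) : (rowB0 cs v K).length = K+1 := by
  induction K with
  | zero =>
    unfold rowB0
    rw [PySem.List.pyRange_one_eq_nil (by omega)]
    rfl
  | succ K ih => rw [rowB0_succ, List.length_append, ih]; rfl

theorem rowB0_spec (cs u v : List Char) (hcs : ∀ ch ∈ cs, ch.toNat < 128) :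
    ∀ K, K ≤ v.length → ∀ k, k ≤ K → BspecP cs u v 0 k ((rowB0 cs v K).getD k 0) := by
  intro K
  induction K with
  | zero =>
    intro _ k hk
    have hk0 : k = 0 := by omega
    subst hk0
    have : (rowB0 cs v 0).getD 0 0 = 0 := by
      unfold rowB0
      rw [PySem.List.pyRange_one_eq_nil (by omega)]
      rfl
    rw [this]
    exact Bspec_zero cs u v
  | succ K ih =>
    intro hK k hk
    rw [rowB0_succ]
    have e1 : ((K : Int)+1-1) = ((K : Nat) : Int) := by ring
    rcases Nat.lt_or_ge k (K+1) with hlt | hge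
    · rw [getD_snoc_lt (by rw [rowB0_len]; omega)]
      exact ih (by omega) k (by omega)
    · have hke : k = K+1 := by omega
      subst hke
      have hKlen : K < v.length := by omega
      rw [show K+1 = (rowB0 cs v K).length by rw [rowB0_len], getD_snoc_eq, rowB0_len]
      rw [e1, PySem.List.pyGetD_natCast, PySem.List.pyGetD_natCast]
      exact Bspec_right cs u v K _ hcs (ih (by omega) K (le_refl _)) hKlen

def curB (cs u v : List Char) (j0 : Nat) (prev : List Int) (K : Nat) : List Int :=
  (PySem.List.pyRange 1 ((K : Int)+1) 1).foldl (fun cur k =>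
      cur ++ [min (stepB (buildNxt cs) ((cs.length : Nat) : Int) (PySem.List.pyGetD cur (k-1) 0)
                    (PySem.List.pyGetD v (k-1) ' '))
                  (stepB (buildNxt cs) ((cs.length : Nat) : Int) (PySem.List.pyGetD prev k 0)
                    (PySem.List.pyGetD u (j0 : Int) ' '))])
    [stepB (buildNxt cs) ((cs.length : Nat) : Int) (PySem.List.pyGetD prev 0 0)
      (PySem.List.pyGetD u (j0 : Int) ' ')]

theorem curB_succ (cs u v : List Char) (j0 : Nat) (prev : List Int) (K : Nat) :
    curB cs u v j0 prev (K+1) = curB cs u v j0 prev K ++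
      [min (stepB (buildNxt cs) ((cs.length : Nat) : Int)
              (PySem.List.pyGetD (curB cs u v j0 prev K) ((K : Int)+1-1) 0)
              (PySem.List.pyGetD v ((K : Int)+1-1) ' '))
           (stepB (buildNxt cs) ((cs.length : Nat) : Int)
              (PySem.List.pyGetD prev ((K : Int)+1) 0)
              (PySem.List.pyGetD u (j0 : Int) ' '))] := by
  unfold curB
  have hc : (((K+1 : Nat) : Int)+1) = ((K : Int)+1)+1 := by push_cast; ring
  rw [hc, PySem.List.pyRange_one_succ_right (by omega), List.foldl_append]
  simp only [List.foldl_cons, List.foldl_nil]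

theorem curB_len (cs u v : List Char) (j0 : Nat) (prev : List Int) (K : Nat) :
    (curB cs u v j0 prev K).length = K+1 := by
  induction K with
  | zero =>
    unfold curB
    rw [PySem.List.pyRange_one_eq_nil (by omega)]
    rfl
  | succ K ih => rw [curB_succ, List.length_append, ih]; rfl

set_option maxHeartbeats 1000000 in
theorem curB_spec (cs u v : List Char) (hcs : ∀ ch ∈ cs, ch.toNat < 128)
    (j0 : Nat) (hj : j0 < u.length) (prev : List Int)
    (hp : ∀ k, k ≤ v.length → BspecP cs u v j0 k (prev.getD k 0)) :
    ∀ K, K ≤ v.length → ∀ k, k ≤ K → BspecP cs u v (j0+1) k ((curB cs u v j0 prev K).getD k 0) := by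
  intro K
  induction K with
  | zero =>
    intro _ k hk
    have hk0 : k = 0 := by omega
    subst hk0
    have h0 : (curB cs u v j0 prev 0).getD 0 0 =
        stepB (buildNxt cs) ((cs.length : Nat) : Int) (PySem.List.pyGetD prev 0 0)
          (PySem.List.pyGetD u (j0 : Int) ' ') := by
      unfold curB
      rw [PySem.List.pyRange_one_eq_nil (by omega)]
      rfl
    rw [h0, PySem.List.pyGetD_natCast]
    have hz : PySem.List.pyGetD prev 0 0 = prev.getD 0 0 := by
      rw [show (0 : Int) = ((0 : Nat) : Int) by norm_num, PySem.List.pyGetD_natCast]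
    rw [hz]
    exact Bspec_left cs u v j0 _ hcs (hp 0 (by omega)) hj
  | succ K ih =>
    intro hK k hk
    rw [curB_succ]
    rcases Nat.lt_or_ge k (K+1) with hlt | hge
    · rw [getD_snoc_lt (by rw [curB_len]; omega)]
      exact ih (by omega) k (by omega)
    · have hke : k = K+1 := by omega
      subst hke
      have hKlen : K < v.length := by omega
      rw [show K+1 = (curB cs u v j0 prev K).length by rw [curB_len], getD_snoc_eq, curB_len]
      have e1 : ((K : Int)+1-1) = ((K : Nat) : Int) := by ring
      have e2 : ((K : Int)+1) = ((K+1 : Nat) : Int) := by push_cast; ring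
      rw [e1, e2, PySem.List.pyGetD_natCast, PySem.List.pyGetD_natCast,
          PySem.List.pyGetD_natCast, PySem.List.pyGetD_natCast]
      exact Bspec_inner cs u v j0 K _ _ hcs (ih (by omega) K (le_refl _))
        (hp (K+1) (by omega)) hj hKlen

def rowsB (cs u v : List Char) : List Int :=
  (PySem.List.pyRange 1 ((u.length : Int)+1) 1).foldl (fun prev j =>
      let cur : List Int := [stepB (buildNxt cs) ((cs.length : Nat) : Int)
        (PySem.List.pyGetD prev 0 0) (PySem.List.pyGetD u (j-1) ' ')]
      let cur := (PySem.List.pyRange 1 ((v.length : Int)+1) 1).foldl (fun cur k =>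
          cur ++ [min (stepB (buildNxt cs) ((cs.length : Nat) : Int)
                        (PySem.List.pyGetD cur (k-1) 0) (PySem.List.pyGetD v (k-1) ' '))
                      (stepB (buildNxt cs) ((cs.length : Nat) : Int)
                        (PySem.List.pyGetD prev k 0) (PySem.List.pyGetD u (j-1) ' '))]) cur
      cur) (rowB0 cs v v.length)

theorem checkB_eq (cs u v : List Char) :
    checkB (buildNxt cs) ((cs.length : Nat) : Int) u v =
      decide (PySem.List.pyGetD (rowsB cs u v) ((v.length : Nat) : Int) 0 ≤ ((cs.length : Nat) : Int)) := rfl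

theorem rowsB_eq (cs u v : List Char) :
    rowsB cs u v = (PySem.List.pyRange 1 ((u.length : Int)+1) 1).foldl
      (fun prev j => curB cs u v (j-1).toNat prev v.length) (rowB0 cs v v.length) := by
  unfold rowsB
  apply PySem.List.foldl_congr_mem
  intro acc x hx
  have hx1 : 1 ≤ x := (PySem.List.mem_pyRange_one.mp hx).1
  have e : (((x-1).toNat : Nat) : Int) = x - 1 := by omega
  unfold curB
  simp only [e]

theorem checkB_iff (cs u v : List Char)
    (hcs : ∀ ch ∈ cs, ch.toNat < 128) :
    (checkB (buildNxt cs) (cs.length : Int) u v = true ↔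
      Reach cs u v cs.length u.length v.length) := by
  have houter : ∀ J, J ≤ u.length →
      ((PySem.List.pyRange 1 ((J : Int)+1) 1).foldl (fun prev j =>
        curB cs u v (j-1).toNat prev v.length) (rowB0 cs v v.length)).length = v.length + 1 ∧
      ∀ k, k ≤ v.length → BspecP cs u v J k
        (((PySem.List.pyRange 1 ((J : Int)+1) 1).foldl (fun prev j =>
          curB cs u v (j-1).toNat prev v.length) (rowB0 cs v v.length)).getD k 0) := by
    intro J
    induction J with
    | zero =>
      intro _
      rw [PySem.List.pyRange_one_eq_nil (by omega)]
      exact ⟨rowB0_len cs v v.length, rowB0_spec cs u v hcs v.length (le_refl _)⟩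
    | succ J ih =>
      intro hJ
      have hc : (((J+1 : Nat) : Int)+1) = ((J : Int)+1)+1 := by push_cast; ring
      rw [hc, PySem.List.pyRange_one_succ_right (by omega), List.foldl_append]
      simp only [List.foldl_cons, List.foldl_nil]
      obtain ⟨ihl, ihs⟩ := ih (by omega)
      have ht : (((J : Int)+1)-1).toNat = J := by omega
      rw [ht]
      exact ⟨curB_len cs u v J _ v.length,
        curB_spec cs u v hcs J (by omega) _ ihs v.length (le_refl _)⟩
  obtain ⟨hlen, hsp⟩ := houter u.length (le_refl _)
  obtain ⟨hb0, hb1, hb2⟩ := hsp v.length (le_refl _)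
  rw [checkB_eq, rowsB_eq, PySem.List.pyGetD_natCast, decide_eq_true_iff]
  exact (hb2 cs.length (le_refl _)).symm

-- ===== A-side: row characterization of the dp table =====

def pendL (u : List Char) (c : Char) (r : List Int) (j : Nat) : Int :=
  if 0 < j ∧ j ≤ u.length ∧ 0 ≤ r.getD (j-1) (-1) ∧ u.getD (j-1) ' ' = c then r.getD (j-1) (-1) else -1

def pendD (v : List Char) (c : Char) (r : List Int) (j : Nat) : Int :=
  if 0 ≤ r.getD j (-1) ∧ r.getD j (-1) < (v.length : Int) ∧ v.getD (r.getD j (-1)).toNat ' ' = c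
    then r.getD j (-1) + 1 else -1

def finalV (u v : List Char) (c : Char) (r : List Int) (j : Nat) : Int :=
  max (max (max (-1) (pendL u c r j)) (pendD v c r j)) (r.getD j (-1))

def rowA (u v : List Char) (c : Char) (r : List Int) : List Int :=
  (List.range (u.length+1)).map (finalV u v c r)

def rowSeq (cs u v : List Char) : Nat → List Int
  | 0 => (List.replicate (u.length+1) (-1 : Int)).set 0 0
  | (i+1) => rowA u v (cs.getD i ' ') (rowSeq cs u v i)

def tbl (cs u v : List Char) (m : Nat) : List (List Int) :=
  (List.range (cs.length+1)).map (fun p =>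
    if p ≤ m then rowSeq cs u v p else List.replicate (u.length+1) (-1 : Int))

-- partial row during the inner loop: columns < t final, column t carries the pending write
def partRow (u v : List Char) (c : Char) (r : List Int) (t : Nat) : List Int :=
  (List.range (u.length+1)).map (fun j =>
    if j < t then finalV u v c r j else if j = t then max (-1) (pendL u c r j) else -1)

theorem set_map_range {α : Type} (f : Nat → α) (N q : Nat) (x : α) :
    ((List.range N).map f).set q x =
      (List.range N).map (fun p => if p = q then x else f p) := by
  apply List.ext_getElem (by simp)
  intro n h1 h2
  simp only [List.getElem_set, List.getElem_map, List.getElem_range]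
  by_cases h : n = q <;> simp [h]
  intro h'; omega

theorem getD_set_self {l : List Int} {t : Nat} {a d : Int} (h : t < l.length) :
    (l.set t a).getD t d = a := by
  rw [List.getD_eq_getElem?_getD, List.getElem?_set_self h, Option.getD_some]

theorem getD_set_ne {l : List Int} {t' t : Nat} {a d : Int} (h : t' ≠ t) :
    (l.set t' a).getD t d = l.getD t d := by
  rw [List.getD_eq_getElem?_getD, List.getElem?_set_ne h, ← List.getD_eq_getElem?_getD]

theorem tbl_len (cs u v : List Char) (m : Nat) : (tbl cs u v m).length = cs.length+1 := by
  unfold tbl; simp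

theorem partRow_len (u v : List Char) (c : Char) (r : List Int) (t : Nat) :
    (partRow u v c r t).length = u.length+1 := by
  unfold partRow; simp

theorem partRow_getD (u v : List Char) (c : Char) (r : List Int) (t j : Nat) (hj : j ≤ u.length) :
    (partRow u v c r t).getD j (-1) =
      if j < t then finalV u v c r j else if j = t then max (-1) (pendL u c r j) else -1 := by
  unfold partRow
  rw [PySem.List.getD_map_range _ _ _ _ (by omega)]

theorem pendL_zero (u : List Char) (c : Char) (r : List Int) : pendL u c r 0 = -1 := by
  unfold pendL
  rw [if_neg (by omega)]

theorem partRow_zero (u v : List Char) (c : Char) (r : List Int) :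
    partRow u v c r 0 = List.replicate (u.length+1) (-1) := by
  unfold partRow
  apply List.ext_getElem (by simp)
  intro i h1 h2
  simp only [List.getElem_map, List.getElem_range, List.getElem_replicate]
  by_cases hi : i = 0
  · subst hi
    rw [if_neg (by omega), if_pos rfl, pendL_zero]
    norm_num
  · rw [if_neg (by omega), if_neg hi]

theorem partRow_full (u v : List Char) (c : Char) (r : List Int) :
    partRow u v c r (u.length+1) = rowA u v c r := by
  unfold partRow rowA
  apply List.map_congr_left
  intro a ha
  rw [if_pos (List.mem_range.mp ha)]

theorem tbl_set_replicate (cs u v : List Char) (m : Nat) :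
    (tbl cs u v m).set (m+1) (List.replicate (u.length+1) (-1)) = tbl cs u v m := by
  unfold tbl
  rw [set_map_range]
  apply List.map_congr_left
  intro p hp
  by_cases hpe : p = m+1
  · subst hpe; rw [if_pos rfl, if_neg (by omega)]
  · rw [if_neg hpe]

theorem tbl_succ (cs u v : List Char) (m : Nat) :
    (tbl cs u v m).set (m+1) (rowA u v (cs.getD m ' ') (rowSeq cs u v m)) = tbl cs u v (m+1) := by
  unfold tbl
  rw [set_map_range]
  apply List.map_congr_left
  intro p hp
  by_cases hpe : p = m+1
  · subst hpe; rw [if_pos rfl, if_pos (le_refl _)]; rfl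
  · rw [if_neg hpe]
    by_cases hple : p ≤ m
    · rw [if_pos hple, if_pos (by omega)]
    · rw [if_neg hple, if_neg (by omega)]

theorem tblset_row_m (cs u v : List Char) (m : Nat) (w : List Int) (t' : Nat)
    (hm : m < cs.length) :
    get2 ((tbl cs u v m).set (m+1) w) (m : Int) (t' : Int) = (rowSeq cs u v m).getD t' (-1) := by
  unfold get2
  rw [PySem.List.pyGetD_natCast, PySem.List.pyGetD_natCast]
  have houter : ((tbl cs u v m).set (m+1) w).getD m [] = (tbl cs u v m).getD m [] := by
    rw [List.getD_eq_getElem?_getD, List.getElem?_set_ne (by omega), ← List.getD_eq_getElem?_getD]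
  rw [houter]
  unfold tbl
  rw [PySem.List.getD_map_range _ _ _ _ (by omega), if_pos (le_refl _)]

theorem tblset_row_m1 (cs u v : List Char) (m : Nat) (w : List Int) (hm : m < cs.length) :
    PySem.List.pyGetD ((tbl cs u v m).set (m+1) w) ((m : Int)+1) [] = w := by
  have e : ((m : Int)+1) = ((m+1 : Nat) : Int) := by push_cast; ring
  rw [e, PySem.List.pyGetD_natCast, List.getD_eq_getElem?_getD,
      List.getElem?_set_self (by rw [tbl_len]; omega), Option.getD_some]

theorem upd2max_set (cs u v : List Char) (m : Nat) (w : List Int) (hm : m < cs.length)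
    (i : Int) (t' : Nat) (hi : i = (t' : Int)) (x : Int) :
    upd2max ((tbl cs u v m).set (m+1) w) ((m : Int)+1) i x =
      (tbl cs u v m).set (m+1) (w.set t' (max (w.getD t' (-1)) x)) := by
  subst hi
  unfold upd2max get2
  rw [tblset_row_m1 cs u v m w hm, PySem.List.pyGetD_natCast]
  have e1 : ((m : Int)+1).toNat = m+1 := by omega
  have e2 : ((t' : Int)).toNat = t' := by omega
  rw [e1, e2, List.set_set]

def bodyA (cs u v : List Char) (m : Nat) (dp : List (List Int)) (j : Int) : List (List Int) :=
  let dp :=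
    if 0 ≤ get2 dp (m : Int) j then
      let dp :=
        if j < (u.length : Int) ∧ PySem.List.pyGetD u j ' ' = PySem.List.pyGetD cs (m : Int) ' ' then
          upd2max dp ((m : Int)+1) (j+1) (get2 dp (m : Int) j)
        else dp
      let dp :=
        if get2 dp (m : Int) j < (v.length : Int) ∧
            PySem.List.pyGetD v (get2 dp (m : Int) j) ' ' = PySem.List.pyGetD cs (m : Int) ' ' then
          upd2max dp ((m : Int)+1) j (get2 dp (m : Int) j + 1)
        else dp
      dp
    else dp
  upd2max dp ((m : Int)+1) j (get2 dp (m : Int) j)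

theorem bodyA_step (cs u v : List Char) (m : Nat) (hm : m < cs.length) (t : Nat)
    (ht : t ≤ u.length) :
    bodyA cs u v m ((tbl cs u v m).set (m+1)
        (partRow u v (cs.getD m ' ') (rowSeq cs u v m) t)) (t : Int) =
      (tbl cs u v m).set (m+1) (partRow u v (cs.getD m ' ') (rowSeq cs u v m) (t+1)) := by
  simp only [bodyA]
  rw [tblset_row_m cs u v m (partRow u v (cs.getD m ' ') (rowSeq cs u v m) t) t hm]
  rw [PySem.List.pyGetD_natCast u t ' ', PySem.List.pyGetD_natCast cs m ' ']
  rw [upd2max_set cs u v m _ hm ((t : Int)+1) (t+1) (by push_cast; ring) _]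
  rw [← apply_ite ((tbl cs u v m).set (m+1))]
  rw [tblset_row_m cs u v m _ t hm]
  rw [upd2max_set cs u v m _ hm (t : Int) t rfl _]
  rw [← apply_ite ((tbl cs u v m).set (m+1))]
  rw [← apply_ite ((tbl cs u v m).set (m+1))]
  rw [tblset_row_m cs u v m _ t hm]
  rw [upd2max_set cs u v m _ hm (t : Int) t rfl _]
  congr 1
  set c := cs.getD m ' ' with hc
  set r := rowSeq cs u v m with hr
  set rt := r.getD t (-1) with hrt
  have hg1 : (partRow u v c r t).getD (t+1) (-1) = -1 := by
    by_cases h : t + 1 ≤ u.length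
    · rw [partRow_getD _ _ _ _ _ _ h, if_neg (by omega), if_neg (by omega)]
    · exact List.getD_eq_default _ _ (by rw [partRow_len]; omega)
  have hg2 : (partRow u v c r t).getD t (-1) = max (-1) (pendL u c r t) := by
    rw [partRow_getD _ _ _ _ _ _ ht, if_neg (by omega), if_pos rfl]
  -- pointwise finisher, parameterized by the two branch facts
  have main : ∀ (w : List Int), w.length = u.length + 1 →
      (∀ hpt : t < u.length + 1, w.getD t (-1) = finalV u v c r t) →
      (∀ hpt1 : t + 1 < u.length + 1, w.getD (t+1) (-1) = max (-1) (pendL u c r (t+1))) →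
      (∀ p, p < u.length + 1 → p ≠ t → p ≠ t+1 → w.getD p (-1) =
        (if p < t then finalV u v c r p else -1)) →
      w = partRow u v c r (t+1) := by
    intro w hwl hwt hwt1 hwp
    apply List.ext_getElem (by rw [hwl, partRow_len])
    intro p h1 h2
    have hp' : p < u.length + 1 := by rwa [hwl] at h1
    have hgw : w[p] = w.getD p (-1) := by rw [List.getD_eq_getElem?_getD, List.getElem?_eq_getElem h1]; rfl
    have hgP : (partRow u v c r (t+1))[p] = (partRow u v c r (t+1)).getD p (-1) := by
      rw [List.getD_eq_getElem?_getD, List.getElem?_eq_getElem h2]; rfl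
    rw [hgw, hgP, partRow_getD _ _ _ _ _ _ (by omega)]
    by_cases hpt : p = t
    · subst hpt
      rw [hwt hp', if_pos (by omega)]
    · by_cases hpt1 : p = t+1
      · subst hpt1
        rw [hwt1 hp', if_neg (by omega), if_pos rfl]
      · rw [hwp p hp' hpt hpt1]
        by_cases hplt : p < t
        · rw [if_pos hplt, if_pos (by omega)]
        · rw [if_neg hplt, if_neg (by omega), if_neg (by omega)]
  by_cases H0 : 0 ≤ rt
  · have hveq : PySem.List.pyGetD v rt ' ' = v.getD rt.toNat ' ' := by
      rw [show rt = ((rt.toNat : Nat) : Int) by omega, PySem.List.pyGetD_natCast,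
          Int.toNat_natCast]
    rw [if_pos H0, hveq]
    by_cases HC1 : (t : Int) < (u.length : Int) ∧ u.getD t ' ' = c
    · have ht1 : t + 1 ≤ u.length := by exact_mod_cast HC1.1
      rw [if_pos HC1, hg1]
      have hpL1 : pendL u c r (t+1) = rt := by
        unfold pendL
        rw [if_pos ⟨by omega, by omega, H0, HC1.2⟩]
        rfl
      have hW1t : ((partRow u v c r t).set (t+1) (max (-1) rt)).getD t (-1) =
          max (-1) (pendL u c r t) := by
        rw [getD_set_ne (by omega), hg2]
      by_cases HC2 : rt < (v.length : Int) ∧ v.getD rt.toNat ' ' = c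
      · rw [if_pos HC2, hW1t]
        have hD : pendD v c r t = rt + 1 := by
          unfold pendD
          rw [if_pos ⟨H0, HC2.1, HC2.2⟩]
        rw [getD_set_self (by rw [List.length_set, partRow_len]; omega), List.set_set]
        apply main
        · simp [partRow_len]
        · intro _
          rw [getD_set_self (by rw [List.length_set, partRow_len]; omega)]
          unfold finalV
          rw [hD]
        · intro _
          rw [getD_set_ne (by omega), getD_set_self (by rw [partRow_len]; omega), hpL1]
        · intro p hp hh1 hh2
          rw [getD_set_ne (Ne.symm hh1), getD_set_ne (Ne.symm hh2),
              partRow_getD _ _ _ _ _ _ (by omega)]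
          by_cases hplt : p < t
          · rw [if_pos hplt, if_pos hplt]
          · rw [if_neg hplt, if_neg hh1, if_neg hplt]
      · rw [if_neg HC2, hW1t]
        have hD : pendD v c r t = -1 := by
          unfold pendD
          exact if_neg (fun hcon => HC2 ⟨hcon.2.1, hcon.2.2⟩)
        apply main
        · simp [partRow_len]
        · intro _
          rw [getD_set_self (by rw [List.length_set, partRow_len]; omega)]
          unfold finalV
          rw [hD, max_eq_left (le_max_left (-1 : Int) (pendL u c r t))]
        · intro _
          rw [getD_set_ne (by omega), getD_set_self (by rw [partRow_len]; omega), hpL1]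
        · intro p hp hh1 hh2
          rw [getD_set_ne (Ne.symm hh1), getD_set_ne (Ne.symm hh2),
              partRow_getD _ _ _ _ _ _ (by omega)]
          by_cases hplt : p < t
          · rw [if_pos hplt, if_pos hplt]
          · rw [if_neg hplt, if_neg hh1, if_neg hplt]
    · rw [if_neg HC1]
      have hpL1 : pendL u c r (t+1) = -1 := by
        unfold pendL
        refine if_neg (fun hcon => HC1 ⟨by exact_mod_cast (show t < u.length by omega), hcon.2.2.2⟩)
      by_cases HC2 : rt < (v.length : Int) ∧ v.getD rt.toNat ' ' = c
      · rw [if_pos HC2, hg2]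
        have hD : pendD v c r t = rt + 1 := by
          unfold pendD
          rw [if_pos ⟨H0, HC2.1, HC2.2⟩]
        rw [getD_set_self (by rw [partRow_len]; omega), List.set_set]
        apply main
        · simp [partRow_len]
        · intro _
          rw [getD_set_self (by rw [partRow_len]; omega)]
          unfold finalV
          rw [hD]
        · intro ht1'
          rw [getD_set_ne (by omega), hg1, hpL1]
          norm_num
        · intro p hp hh1 hh2
          rw [getD_set_ne (Ne.symm hh1), partRow_getD _ _ _ _ _ _ (by omega)]
          by_cases hplt : p < t
          · rw [if_pos hplt, if_pos hplt]
          · rw [if_neg hplt, if_neg hh1, if_neg hplt]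
      · rw [if_neg HC2, hg2]
        have hD : pendD v c r t = -1 := by
          unfold pendD
          exact if_neg (fun hcon => HC2 ⟨hcon.2.1, hcon.2.2⟩)
        apply main
        · simp [partRow_len]
        · intro _
          rw [getD_set_self (by rw [partRow_len]; omega)]
          unfold finalV
          rw [hD, max_eq_left (le_max_left (-1 : Int) (pendL u c r t))]
        · intro ht1'
          rw [getD_set_ne (by omega), hg1, hpL1]
          norm_num
        · intro p hp hh1 hh2
          rw [getD_set_ne (Ne.symm hh1), partRow_getD _ _ _ _ _ _ (by omega)]
          by_cases hplt : p < t
          · rw [if_pos hplt, if_pos hplt]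
          · rw [if_neg hplt, if_neg hh1, if_neg hplt]
  · rw [if_neg H0, hg2]
    have hD : pendD v c r t = -1 := by
      unfold pendD
      exact if_neg (fun hcon => H0 hcon.1)
    have hpL1 : pendL u c r (t+1) = -1 := by
      unfold pendL
      exact if_neg (fun hcon => H0 hcon.2.2.1)
    apply main
    · simp [partRow_len]
    · intro _
      rw [getD_set_self (by rw [partRow_len]; omega)]
      unfold finalV
      rw [hD, max_eq_left (le_max_left (-1 : Int) (pendL u c r t))]
    · intro ht1'
      rw [getD_set_ne (by omega), hg1, hpL1]
      norm_num
    · intro p hp hh1 hh2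
      rw [getD_set_ne (Ne.symm hh1), partRow_getD _ _ _ _ _ _ (by omega)]
      by_cases hplt : p < t
      · rw [if_pos hplt, if_pos hplt]
      · rw [if_neg hplt, if_neg hh1, if_neg hplt]

theorem innerLoop (cs u v : List Char) (m : Nat) (hm : m < cs.length) :
    (PySem.List.pyRange 0 ((u.length : Int)+1) 1).foldl (fun dp j =>
      let dp :=
        if 0 ≤ get2 dp (m : Int) j then
          let dp :=
            if j < (u.length : Int) ∧ PySem.List.pyGetD u j ' ' = PySem.List.pyGetD cs (m : Int) ' ' then
              upd2max dp ((m : Int)+1) (j+1) (get2 dp (m : Int) j)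
            else dp
          let dp :=
            if get2 dp (m : Int) j < (v.length : Int) ∧
                PySem.List.pyGetD v (get2 dp (m : Int) j) ' ' = PySem.List.pyGetD cs (m : Int) ' ' then
              upd2max dp ((m : Int)+1) j (get2 dp (m : Int) j + 1)
            else dp
          dp
        else dp
      upd2max dp ((m : Int)+1) j (get2 dp (m : Int) j)) (tbl cs u v m) = tbl cs u v (m+1) := by
  show (PySem.List.pyRange 0 ((u.length : Int)+1) 1).foldl (bodyA cs u v m) (tbl cs u v m) =
    tbl cs u v (m+1)
  have hb : ((u.length : Int)+1) = ((u.length+1 : Nat) : Int) := by push_cast; ring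
  rw [hb, PySem.List.pyRange_zero_natCast, List.foldl_map]
  have key : ∀ t, t ≤ u.length+1 →
      (List.range t).foldl (fun dp (k : Nat) => bodyA cs u v m dp (k : Int)) (tbl cs u v m) =
        (tbl cs u v m).set (m+1) (partRow u v (cs.getD m ' ') (rowSeq cs u v m) t) := by
    intro t
    induction t with
    | zero =>
      intro _
      rw [List.range_zero, List.foldl_nil, partRow_zero, tbl_set_replicate]
    | succ t ih =>
      intro ht
      rw [List.range_succ, List.foldl_append, ih (by omega)]
      simp only [List.foldl_cons, List.foldl_nil]
      exact bodyA_step cs u v m hm t (by omega)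
  rw [key (u.length+1) (le_refl _), partRow_full, tbl_succ]

def rowOK (cs u v : List Char) (i : Nat) (r : List Int) : Prop :=
  (∀ j : Nat, r.getD j (-1) ≤ (v.length : Int)) ∧
  (∀ j k : Nat, j ≤ u.length → (Reach cs u v i j k ↔ (k : Int) ≤ r.getD j (-1)))

theorem rowSeq_zero_getD (cs u v : List Char) (j : Nat) :
    (rowSeq cs u v 0).getD j (-1) = if j = 0 then 0 else -1 := by
  have h : rowSeq cs u v 0 = (0 : Int) :: List.replicate u.length (-1) := by
    simp [rowSeq, List.replicate_succ]
  rw [h]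
  cases j with
  | zero => rfl
  | succ m =>
    simp only [List.getD_cons_succ]
    by_cases hm : m < u.length
    · simp [hm]
    · simp [hm]

theorem rowOK_zero (cs u v : List Char) : rowOK cs u v 0 (rowSeq cs u v 0) := by
  constructor
  · intro j; rw [rowSeq_zero_getD]; split <;> omega
  · intro j k hj
    rw [rowSeq_zero_getD]
    constructor
    · intro h
      rcases reach_zero_inv h with ⟨rfl, rfl⟩
      simp
    · intro h
      by_cases h0 : j = 0
      · subst h0
        simp only [if_pos rfl] at h
        have hk : (k : Int) ≤ 0 := h
        have : k = 0 := by omega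
        subst this; exact Reach.zero
      · simp only [if_neg h0] at h; omega

theorem rowA_getD (u v : List Char) (c : Char) (r : List Int) (j : Nat) (hj : j ≤ u.length) :
    (rowA u v c r).getD j (-1) = finalV u v c r j := by
  unfold rowA
  rw [PySem.List.getD_map_range _ _ _ _ (by omega)]

theorem rowOK_step (cs u v : List Char) (i : Nat) (r : List Int)
    (h : rowOK cs u v i r) (hi : i < cs.length) :
    rowOK cs u v (i+1) (rowA u v (cs.getD i ' ') r) := by
  obtain ⟨hbd, hiff⟩ := h
  constructor
  · intro j
    by_cases hj : j ≤ u.length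
    · rw [rowA_getD _ _ _ _ _ hj]
      refine max_le (max_le (max_le (by omega) ?_) ?_) (hbd j)
      · unfold pendL
        split_ifs with hg
        · exact hbd (j-1)
        · omega
      · unfold pendD
        split_ifs with hg
        · have := hg.2.1; omega
        · omega
    · rw [List.getD_eq_default _ _ (by simp [rowA]; omega)]
      omega
  · intro j k hj
    rw [rowA_getD _ _ _ _ _ hj]
    constructor
    · intro hR
      cases hR with
      | skip hR' hlt =>
        exact le_trans ((hiff j k hj).mp hR') (le_max_right _ _)
      | left hR' hc hu' =>
        obtain ⟨hj'lt, hueq⟩ := List.getElem?_eq_some_iff.mp hu'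
        obtain ⟨hilt, hceq⟩ := List.getElem?_eq_some_iff.mp hc
        rename_i j' cc
        have hk' : (k : Int) ≤ r.getD j' (-1) := (hiff j' k (by omega)).mp hR'
        have hpL : pendL u (cs.getD i ' ') r (j'+1) = r.getD j' (-1) := by
          unfold pendL
          rw [if_pos ⟨by omega, by omega,
            le_trans (by positivity) hk',
            by rw [show j'+1-1 = j' from rfl, List.getD_eq_getElem _ _ hj'lt,
              List.getD_eq_getElem _ _ hilt, hueq, hceq]⟩]
          rfl
        refine le_trans (le_trans (hpL ▸ hk') (le_max_right (-1) _)) ?_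
        exact le_trans (le_max_left _ _) (le_max_left _ _)
      | right hR' hc hv' =>
        obtain ⟨hk'lt, hveq2⟩ := List.getElem?_eq_some_iff.mp hv'
        obtain ⟨hilt, hceq⟩ := List.getElem?_eq_some_iff.mp hc
        rename_i k' cc
        have hk' : ((k' : Nat) : Int) ≤ r.getD j (-1) := (hiff j k' hj).mp hR'
        by_cases hcase : ((k' : Nat) : Int) = r.getD j (-1)
        · have hchar : v.getD (r.getD j (-1)).toNat ' ' = cs.getD i ' ' := by
            rw [show (r.getD j (-1)).toNat = k' by omega,
              List.getD_eq_getElem _ _ hk'lt, List.getD_eq_getElem _ _ hilt, hveq2, hceq]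
          have hpD : pendD v (cs.getD i ' ') r j = r.getD j (-1) + 1 := by
            unfold pendD
            rw [if_pos ⟨by omega, by omega, hchar⟩]
          have hstep : ((k'+1 : Nat) : Int) ≤ pendD v (cs.getD i ' ') r j := by
            rw [hpD]; push_cast; omega
          exact le_trans (le_trans hstep (le_max_right _ _)) (le_max_left _ _)
        · have : ((k' : Nat) : Int) < r.getD j (-1) := lt_of_le_of_ne hk' hcase
          refine le_trans (by push_cast; omega : ((k'+1 : Nat) : Int) ≤ r.getD j (-1))
            (le_max_right _ _)
    · intro hk
      rcases le_max_iff.mp hk with h1 | h1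
      · rcases le_max_iff.mp h1 with h2 | h2
        · rcases le_max_iff.mp h2 with h3 | h3
          · omega
          · unfold pendL at h3
            split_ifs at h3 with hg
            · obtain ⟨hg1, hg2, hg3, hg4⟩ := hg
              have hRk : Reach cs u v i (j-1) k := (hiff (j-1) k (by omega)).mpr h3
              have hres := Reach.left hRk (getD_self_of_lt hi)
                (by rw [getD_self_of_lt (show j-1 < u.length by omega)]; rw [hg4])
              rwa [show j-1+1 = j by omega] at hres
            · omega
        · unfold pendD at h2
          split_ifs at h2 with hg
          · obtain ⟨hg1, hg2, hg3⟩ := hg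
            by_cases hk2 : (k : Int) ≤ r.getD j (-1)
            · exact Reach.skip ((hiff j k hj).mpr hk2) hi
            · have hk1 : 1 ≤ k := by omega
              have hRk : Reach cs u v i j (k-1) := (hiff j (k-1) hj).mpr (by push_cast; omega)
              have hvk : v[(k-1 : Nat)]? = some (cs.getD i ' ') := by
                rw [getD_self_of_lt (show k-1 < v.length by omega)]
                rw [show k-1 = (r.getD j (-1)).toNat by omega, hg3]
              have hres := Reach.right hRk (getD_self_of_lt hi) hvk
              rwa [show k-1+1 = k by omega] at hres
          · omega
      · exact Reach.skip ((hiff j k hj).mpr h1) hi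

theorem rowOK_all (cs u v : List Char) (i : Nat) (hi : i ≤ cs.length) :
    rowOK cs u v i (rowSeq cs u v i) := by
  induction i with
  | zero => exact rowOK_zero cs u v
  | succ m ih => exact rowOK_step cs u v m _ (ih (by omega)) (by omega)

theorem checkA_iff (cs u v : List Char) :
    (checkA cs u v = true ↔ Reach cs u v cs.length u.length v.length) := by
  simp only [checkA]
  have hdp0 : (PySem.List.pyRange 0 ((cs.length : Int)+1) 1).map
      (fun _ => PySem.List.pyRepeat [(-1 : Int)] ((u.length : Int)+1)) =
      List.replicate (cs.length+1) (List.replicate (u.length+1) (-1 : Int)) := by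
    rw [show ((cs.length : Int)+1) = ((cs.length+1 : Nat) : Int) by push_cast; ring,
        PySem.List.pyRange_zero_natCast, List.map_map]
    rw [PySem.List.pyRepeat_singleton, show ((u.length : Int)+1).toNat = u.length+1 by omega]
    rw [show ((fun _ => List.replicate (u.length+1) (-1 : Int)) ∘ (fun (k : Nat) => (k : Int)))
        = (fun (_ : Nat) => List.replicate (u.length+1) (-1 : Int)) from rfl]
    rw [List.map_const', List.length_range]
  rw [hdp0]
  have hget0 : PySem.List.pyGetD
      (List.replicate (cs.length+1) (List.replicate (u.length+1) (-1 : Int))) (0 : Int) []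
      = List.replicate (u.length+1) (-1 : Int) := by
    have h1 : PySem.List.pyIdx? (cs.length+1) (0 : Int) = some 0 := by
      simp [PySem.List.pyIdx?]
    simp [PySem.List.pyGetD, PySem.List.pyGet?, h1, List.getElem?_replicate]
  rw [hget0]
  have hinit : (List.replicate (cs.length+1) (List.replicate (u.length+1) (-1 : Int))).set 0
      ((List.replicate (u.length+1) (-1 : Int)).set 0 0) = tbl cs u v 0 := by
    unfold tbl
    apply List.ext_getElem (by simp)
    intro p h1 h2
    simp only [List.getElem_set, List.getElem_replicate, List.getElem_map, List.getElem_range]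
    by_cases hp : p = 0
    · subst hp
      rw [if_pos rfl, if_pos (le_refl _)]
      rfl
    · rw [if_neg (fun h => hp h.symm), if_neg (by omega)]
  rw [hinit]
  rw [PySem.List.pyRange_zero_natCast, List.foldl_map]
  have hfold : ∀ M, M ≤ cs.length →
      (List.range M).foldl (fun dp (k : Nat) =>
        (PySem.List.pyRange 0 ((u.length : Int)+1) 1).foldl (fun dp j =>
          let dp :=
            if 0 ≤ get2 dp (k : Int) j then
              let dp :=
                if j < (u.length : Int) ∧
                    PySem.List.pyGetD u j ' ' = PySem.List.pyGetD cs (k : Int) ' ' then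
                  upd2max dp ((k : Int)+1) (j+1) (get2 dp (k : Int) j)
                else dp
              let dp :=
                if get2 dp (k : Int) j < (v.length : Int) ∧
                    PySem.List.pyGetD v (get2 dp (k : Int) j) ' ' =
                      PySem.List.pyGetD cs (k : Int) ' ' then
                  upd2max dp ((k : Int)+1) j (get2 dp (k : Int) j + 1)
                else dp
              dp
            else dp
          upd2max dp ((k : Int)+1) j (get2 dp (k : Int) j)) dp) (tbl cs u v 0)
      = tbl cs u v M := by
    intro M
    induction M with
    | zero => intro _; rw [List.range_zero, List.foldl_nil]
    | succ M ih =>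
      intro hM
      rw [List.range_succ, List.foldl_append, ih (by omega)]
      simp only [List.foldl_cons, List.foldl_nil]
      exact innerLoop cs u v M (by omega)
  rw [hfold cs.length (le_refl _)]
  have hgetn : get2 (tbl cs u v cs.length) (cs.length : Int) (u.length : Int)
      = (rowSeq cs u v cs.length).getD u.length (-1) := by
    unfold get2
    rw [PySem.List.pyGetD_natCast, PySem.List.pyGetD_natCast]
    unfold tbl
    rw [PySem.List.getD_map_range _ _ _ _ (by omega), if_pos (le_refl _)]
  rw [hgetn, decide_eq_true_iff]
  obtain ⟨hbd, hiff⟩ := rowOK_all cs u v cs.length (le_refl _)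
  rw [hiff u.length v.length (le_refl _)]
  have := hbd u.length
  omega

theorem check_eq (cs u v : List Char)
    (hcs : ∀ ch ∈ cs, ch.toNat < 128) :
    checkA cs u v = checkB (buildNxt cs) (cs.length : Int) u v := by
  rcases hA : checkA cs u v with _ | _ <;> rcases hB : checkB (buildNxt cs) (cs.length : Int) u v with _ | _
  · rfl
  · exact absurd ((checkA_iff cs u v).mpr ((checkB_iff cs u v hcs).mp hB)) (by simp [hA])
  · exact absurd ((checkB_iff cs u v hcs).mpr ((checkA_iff cs u v).mp hA)) (by simp [hB])
  · rfl

-- ===== VERDICT (by name: the statement is the Claim_ definition above) =====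
theorem solve_spec : Claim_equal_solve := by
  intro s t hdom
  have hcs : ∀ c ∈ s.toList, c.toNat < 128 := by
    apply dom_codes
    unfold Dom_solve at hdom
    exact ((Bool.and_eq_true _ _).mp hdom).1
  unfold Spec_solve
  simp only [solve, solve_alt]
  have hany : (PySem.List.pyRange 0 ((t.toList.length : Nat) : Int) 1).any (fun i =>
        checkA s.toList (PySem.List.slice t.toList none (some i))
          (PySem.List.slice t.toList (some i) none)) =
      (PySem.List.pyRange 0 ((t.toList.length : Nat) : Int) 1).any (fun i =>
        checkB (buildNxt s.toList) ((s.toList.length : Nat) : Int)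
          (PySem.List.slice t.toList none (some i))
          (PySem.List.slice t.toList (some i) none)) := by
    apply PySem.List.any_congr_mem
    intro x hx
    rw [check_eq s.toList _ _ hcs]
  rw [hany]
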